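-- pv_equiv track=rewrite | github.com/qq1833396942/ManPronEval | asr_eval/hubert/train_hubert_large_ce.py | decode_frames
-- ===== SOURCE A (Python) =====
-- def decode_frames(frame_ids, inv_vocab, pad_id):
--     collapsed, last_id = [], -1
--     for idx in frame_ids:
--         idx = int(idx)
--         if idx == -100: continue
--         if idx != last_id:
--             if idx != pad_id: collapsed.append(idx)
--             last_id = idx
--     return " ".join([inv_vocab.get(i, "[UNK]") for i in collapsed])
-- ===== SOURCE B (Python) =====
-- def decode_frames(frame_ids, inv_vocab, pad_id):
--     ids = [int(x) for x in frame_ids if int(x) != -100]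
--     n = len(ids)
--     toks = []
--     i = 0
--     while i < n:
--         k = ids[i]
--         j = i + 1
--         while j < n and ids[j] == k:
--             j += 1
--         if k != pad_id:
--             toks.append(inv_vocab.get(k, "[UNK]"))
--         i = j
--     return " ".join(toks)
-- ===== Notes on version B (the rewrite author's own statement) =====
-- stated objective: alternative
-- what changed: Replaces A's single stateful element-wise loop (last_id sentinel, conditional append of ids, then map+join) by a run-consuming two-pointer scan: filter -100, then an outer loop whose inner loop advances a second index past the whole run, emitting the looked-up token string per run.
-- intended difference: When the first frame id besides -100 is -1 with pad_id != -1 (and the dropped run is visible: its token is nonempty or a later token survives), A silently drops that leading -1 run because its last_id sentinel starts at -1, returning the string without it; B keeps it, which is the intended collapse since -1 is an ordinary id, not a marker. — e.g. on decode_frames([-1, 3], [(3, "c")], 0): A returns "c", B returns "[UNK] c"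
import Mathlib
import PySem

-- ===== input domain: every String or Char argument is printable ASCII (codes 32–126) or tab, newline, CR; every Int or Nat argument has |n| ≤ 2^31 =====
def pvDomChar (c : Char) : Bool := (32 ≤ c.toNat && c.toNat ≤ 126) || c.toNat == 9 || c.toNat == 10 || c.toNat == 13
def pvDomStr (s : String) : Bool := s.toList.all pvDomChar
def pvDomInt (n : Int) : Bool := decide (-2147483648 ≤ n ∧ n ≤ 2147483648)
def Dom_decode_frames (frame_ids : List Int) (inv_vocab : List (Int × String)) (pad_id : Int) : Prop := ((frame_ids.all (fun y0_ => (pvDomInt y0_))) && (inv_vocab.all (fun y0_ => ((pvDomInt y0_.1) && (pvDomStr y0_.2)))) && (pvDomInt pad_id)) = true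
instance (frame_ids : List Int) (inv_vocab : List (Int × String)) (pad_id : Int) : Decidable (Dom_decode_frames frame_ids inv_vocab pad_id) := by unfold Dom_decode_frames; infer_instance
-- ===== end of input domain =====

-- B replaces A's stateful last_id loop by a run-consuming two-pointer scan (filter -100, inner loop skips each whole run, emits token strings per run); equal except when the first non--100 id is -1 (A's sentinel quirk), stated as D_.


-- ===== PORT A =====
-- A: one fold carrying (collapsed, last_id), last_id starts at -1; skip -100; append when the id changes and is not pad.
def decode_frames (frame_ids : List Int) (inv_vocab : List (Int × String)) (pad_id : Int) : String :=
  let st : List Int × Int := frame_ids.foldl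
    (fun s idx =>
      if idx = -100 then s
      else if idx ≠ s.2 then
        if idx ≠ pad_id then (s.1 ++ [idx], idx) else (s.1, idx)
      else s)
    ([], -1)
  PySem.Str.join " " (st.1.map (PySem.Dict.getD ⟨inv_vocab⟩ · "[UNK]"))

-- ===== PORT B =====
-- B's inner while loop: advance j past the run of value k (j < n checked first, so getD's
-- default is never read; exact for in-range indexing).
def runEndB (ids : List Int) (k : Int) (j : Nat) : Nat :=
  if _h : j < ids.length ∧ ids.getD j 0 = k then runEndB ids k (j + 1) else j
termination_by ids.length - j
decreasing_by omega

-- termination fact the outer loop cites: the inner loop never moves j backwards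
theorem le_runEndB (ids : List Int) (k : Int) (j : Nat) : j ≤ runEndB ids k j := by
  rw [runEndB]
  split
  · exact Nat.le_trans (Nat.le_succ j) (le_runEndB ids k (j + 1))
  · exact Nat.le_refl j
termination_by ids.length - j
decreasing_by omega

-- B's outer while loop: one iteration per run, appending the run's token unless it is pad
def outerB (inv_vocab : List (Int × String)) (pad_id : Int) (ids : List Int)
    (toks : List String) (i : Nat) : List String :=
  if _h : i < ids.length then
    let k := ids.getD i 0
    let j := runEndB ids k (i + 1)
    outerB inv_vocab pad_id ids
      (if k ≠ pad_id then toks ++ [PySem.Dict.getD ⟨inv_vocab⟩ k "[UNK]"] else toks) j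
  else toks
termination_by ids.length - i
decreasing_by
  have := le_runEndB ids (ids.getD i 0) (i + 1)
  omega

def decode_frames_alt (frame_ids : List Int) (inv_vocab : List (Int × String)) (pad_id : Int) : String :=
  PySem.Str.join " " (outerB inv_vocab pad_id (frame_ids.filter (fun x => x ≠ -100)) [] 0)

-- ===== PRECONDITION & SPEC =====
-- A silently drops a leading run of id -1 (its last_id sentinel starts at -1): there A returns the string
-- without that token while B keeps it; B's value is the intended collapse since -1 is an ordinary id.
-- (The third conjunct keeps D_ exact: the dropped run must be visible — its token is nonempty or a later token survives.)
def D_decode_frames (frame_ids : List Int) (inv_vocab : List (Int × String)) (pad_id : Int) : Prop :=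
  frame_ids.find? (· != -100) = some (-1) ∧ pad_id ≠ -1 ∧
    ((inv_vocab.find? (·.1 == -1)).all (·.2 != "") ∨
     (frame_ids.dropWhile ([-100, -1].contains ·)).any (fun x => !([-100, pad_id].contains x)))
instance (frame_ids : List Int) (inv_vocab : List (Int × String)) (pad_id : Int) : Decidable (D_decode_frames frame_ids inv_vocab pad_id) := by unfold D_decode_frames; infer_instance
def Spec_decode_frames (frame_ids : List Int) (inv_vocab : List (Int × String)) (pad_id : Int) (out : String) : Prop := ¬ D_decode_frames frame_ids inv_vocab pad_id → out = decode_frames_alt frame_ids inv_vocab pad_id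
instance (frame_ids : List Int) (inv_vocab : List (Int × String)) (pad_id : Int) (out : String) : Decidable (Spec_decode_frames frame_ids inv_vocab pad_id out) := by unfold Spec_decode_frames; infer_instance
def pvDiffWitness_decode_frames : List Int × (List (Int × String)) × Int := ([-1, 3], [(3, "c")], 0)
def pvDiffWitnessOut_decode_frames : String × String := ("c", "[UNK] c")

-- ===== CLAIM =====
def Claim_unchanged_decode_frames : Prop := ∀ (frame_ids : List Int) (inv_vocab : List (Int × String)) (pad_id : Int), Dom_decode_frames frame_ids inv_vocab pad_id → Spec_decode_frames frame_ids inv_vocab pad_id (decode_frames frame_ids inv_vocab pad_id)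
def Claim_changed_decode_frames : Prop := Dom_decode_frames (pvDiffWitness_decode_frames.1) (pvDiffWitness_decode_frames.2.1) (pvDiffWitness_decode_frames.2.2) ∧ D_decode_frames (pvDiffWitness_decode_frames.1) (pvDiffWitness_decode_frames.2.1) (pvDiffWitness_decode_frames.2.2) ∧ decode_frames (pvDiffWitness_decode_frames.1) (pvDiffWitness_decode_frames.2.1) (pvDiffWitness_decode_frames.2.2) = pvDiffWitnessOut_decode_frames.1 ∧ decode_frames_alt (pvDiffWitness_decode_frames.1) (pvDiffWitness_decode_frames.2.1) (pvDiffWitness_decode_frames.2.2) = pvDiffWitnessOut_decode_frames.2 ∧ pvDiffWitnessOut_decode_frames.1 ≠ pvDiffWitnessOut_decode_frames.2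
def Claim_exact_decode_frames : Prop := ∀ (frame_ids : List Int) (inv_vocab : List (Int × String)) (pad_id : Int), Dom_decode_frames frame_ids inv_vocab pad_id → D_decode_frames frame_ids inv_vocab pad_id → decode_frames frame_ids inv_vocab pad_id ≠ decode_frames_alt frame_ids inv_vocab pad_id

-- ===== LEMMAS AND PROOFS =====

-- A's collapse, written recursively: the ids appended when folding over l with current last_id `last`.
def collA (pad last : Int) : List Int → List Int
  | [] => []
  | x :: xs => if x = last then collA pad last xs
               else (if x = pad then [] else [x]) ++ collA pad x xs

-- consecutive dedupe with the previous element as an Option (proof-side characterisation).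
def ded (prev : Option Int) : List Int → List Int
  | [] => []
  | x :: xs => if (some x : Option Int) = prev then ded prev xs else x :: ded (some x) xs

-- The -100 guard in A's fold is the fold over the filtered list.
theorem foldA_filter (pad : Int) (l : List Int) (s : List Int × Int) :
    l.foldl
      (fun (s : List Int × Int) idx =>
        if idx = -100 then s
        else if idx ≠ s.2 then
          (if idx ≠ pad then (s.1 ++ [idx], idx) else (s.1, idx))
        else s) s
    = (l.filter (fun x => x ≠ -100)).foldl
      (fun (s : List Int × Int) idx =>
        if idx ≠ s.2 then
          (if idx ≠ pad then (s.1 ++ [idx], idx) else (s.1, idx))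
        else s) s := by
  induction l generalizing s with
  | nil => rfl
  | cons x xs ih =>
    by_cases hx : x = -100
    · simpa [hx] using ih s
    · simp only [List.foldl_cons, if_neg hx, List.filter_cons]
      simpa [hx] using ih _

-- A's fold accumulates collA.
theorem foldA_eq_collA (pad : Int) (l : List Int) (acc : List Int) (last : Int) :
    (l.foldl
      (fun (s : List Int × Int) idx =>
        if idx ≠ s.2 then
          (if idx ≠ pad then (s.1 ++ [idx], idx) else (s.1, idx))
        else s) (acc, last)).1 = acc ++ collA pad last l := by
  induction l generalizing acc last with
  | nil => simp [collA]
  | cons x xs ih =>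
    by_cases hl : x = last
    · simpa [collA, hl] using ih acc last
    · by_cases hp : x = pad
      · subst hp
        simpa [collA, hl] using ih acc x
      · simpa [collA, hl, hp] using ih (acc ++ [x]) x

-- skipping the rest of a run is what `ded (some x)` does
theorem ded_some_dropWhile (x : Int) (l : List Int) :
    ded (some x) l = ded none (l.dropWhile (fun y => y == x)) := by
  induction l with
  | nil => rfl
  | cons y ys ih =>
    by_cases h : y = x
    · simpa [ded, h, List.dropWhile] using ih
    · have hb : (y == x) = false := by simpa using h
      simp [ded, List.dropWhile, hb, h]

-- proof-level list form of B's run consumption (one recursive step per run)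
def emitL (inv_vocab : List (Int × String)) (pad_id : Int) : List Int → List String
  | [] => []
  | x :: xs =>
    let toks := emitL inv_vocab pad_id (xs.dropWhile (fun y => y == x))
    if x = pad_id then toks else (PySem.Dict.getD ⟨inv_vocab⟩ x "[UNK]") :: toks
termination_by l => l.length
decreasing_by simpa using Nat.lt_succ_of_le (List.length_dropWhile_le _ _)

-- the inner while loop is dropWhile on the remaining suffix
theorem runEndB_drop (ids : List Int) (k : Int) (j : Nat) :
    ids.drop (runEndB ids k j) = (ids.drop j).dropWhile (fun y => y == k) := by
  rw [runEndB]
  split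
  next h =>
    obtain ⟨hj, hk⟩ := h
    have hk' : ids[j] = k := by
      rwa [List.getD_eq_getElem?_getD, List.getElem?_eq_getElem hj, Option.getD_some] at hk
    rw [runEndB_drop ids k (j + 1), List.drop_eq_getElem_cons hj, List.dropWhile_cons]
    simp [hk']
  next h =>
    by_cases hj : j < ids.length
    · have hk : ids.getD j 0 ≠ k := fun hc => h ⟨hj, hc⟩
      have hk' : ids[j] ≠ k := by
        rwa [List.getD_eq_getElem?_getD, List.getElem?_eq_getElem hj, Option.getD_some] at hk
      rw [List.drop_eq_getElem_cons hj, List.dropWhile_cons]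
      simp [hk']
    · rw [List.drop_eq_nil_of_le (by omega)]
      simp
termination_by ids.length - j
decreasing_by omega

-- B's outer loop accumulates emitL on the remaining suffix
theorem outerB_eq (inv_vocab : List (Int × String)) (pad_id : Int) (ids : List Int)
    (toks : List String) (i : Nat) :
    outerB inv_vocab pad_id ids toks i = toks ++ emitL inv_vocab pad_id (ids.drop i) := by
  rw [outerB]
  split
  next h =>
    have hrec := outerB_eq inv_vocab pad_id ids
      (if ids.getD i 0 ≠ pad_id then
        toks ++ [PySem.Dict.getD ⟨inv_vocab⟩ (ids.getD i 0) "[UNK]"] else toks)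
      (runEndB ids (ids.getD i 0) (i + 1))
    rw [hrec, runEndB_drop, List.drop_eq_getElem_cons h, emitL]
    have hk : ids.getD i 0 = ids[i] := by
      rw [List.getD_eq_getElem?_getD, List.getElem?_eq_getElem h, Option.getD_some]
    have hk2 : ids[i]?.getD 0 = ids[i] := by
      rw [List.getElem?_eq_getElem h, Option.getD_some]
    by_cases hp : ids[i] = pad_id
    · simp [hk2, hp]
    · simp [hk2, hp]
  next h =>
    rw [List.drop_eq_nil_of_le (by omega)]
    rw [emitL]
    simp
termination_by ids.length - i
decreasing_by
  have := le_runEndB ids (ids.getD i 0) (i + 1)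
  omega

-- B's run-consuming recursion computes the pad-filtered dedupe, token-mapped.
theorem emitL_eq (inv_vocab : List (Int × String)) (pad : Int) (l : List Int) :
    emitL inv_vocab pad l
      = ((ded none l).filter (fun i => i ≠ pad)).map
          (fun i => PySem.Dict.getD ⟨inv_vocab⟩ i "[UNK]") := by
  generalize hn : l.length = n
  induction n using Nat.strong_induction_on generalizing l with
  | _ n ih =>
    cases l with
    | nil => rw [emitL]; rfl
    | cons x xs =>
      subst hn
      have hrec := ih (xs.dropWhile (fun y => y == x)).length
        (by simpa using Nat.lt_succ_of_le (List.length_dropWhile_le _ _))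
        (xs.dropWhile (fun y => y == x)) rfl
      have hded : ded none (x :: xs) = x :: ded (some x) xs := by
        rw [ded]; simp
      rw [emitL, hded, ded_some_dropWhile, List.filter_cons, hrec]
      by_cases hp : x = pad
      · simp [hp]
      · simp [hp]

-- collA is the pad-filtered ded started from `some last`.
theorem collA_eq_ded (pad last : Int) (l : List Int) :
    collA pad last l = (ded (some last) l).filter (fun i => i ≠ pad) := by
  induction l generalizing last with
  | nil => rfl
  | cons x xs ih =>
    by_cases hl : x = last
    · subst hl
      simpa [collA, ded] using ih x
    · by_cases hp : x = pad
      · subst hp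
        simpa [collA, ded, hl, List.filter_cons] using ih x
      · simpa [collA, ded, hl, hp, List.filter_cons] using ih x

-- outside D_'s head condition, the two collapses agree
theorem main_eq (pad : Int) (l : List Int)
    (h : ¬ (l.head? = some (-1) ∧ pad ≠ -1)) :
    collA pad (-1) l = (ded none l).filter (fun i => i ≠ pad) := by
  cases l with
  | nil => rfl
  | cons x xs =>
    by_cases hx : x = (-1 : Int)
    · have hp : pad = -1 := by
        by_contra hpn
        exact h ⟨by simp [hx], hpn⟩
      subst hx hp
      simp [collA, ded, collA_eq_ded]
    · by_cases hp : x = pad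
      · simp [collA, ded, hp, collA_eq_ded]
        intro h'
        exact absurd (hp.trans h') hx
      · simp [collA, ded, hx, hp, collA_eq_ded]

-- predicate bridges between D_'s Bool vocabulary and the decide-forms the other lemmas use
theorem bne_pred : ((· != (-100 : Int)) : Int → Bool) = (fun x => decide (x ≠ -100)) := by
  funext x; by_cases h : x = (-100 : Int) <;> simp [h]

theorem dwp_pred : (([-100, -1].contains ·) : Int → Bool)
    = (fun x => decide (x = -100) || decide (x = -1)) := by
  funext x; by_cases h1 : x = (-100 : Int) <;> by_cases h2 : x = (-1 : Int) <;> simp [h1, h2]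

theorem anyp_pred (pad : Int) : ((fun x => !([-100, pad].contains x)) : Int → Bool)
    = (fun x => !(decide (x = -100) || decide (x = pad))) := by
  funext x; by_cases h1 : x = (-100 : Int) <;> by_cases h2 : x = pad <;> simp [h1, h2]

-- the token looked up for -1, in D_'s find?-form
theorem getD_find (inv_vocab : List (Int × String)) :
    (PySem.Dict.mk inv_vocab).getD (-1) "[UNK]"
      = ((inv_vocab.find? (·.1 == -1)).map (·.2)).getD "[UNK]" := by
  induction inv_vocab with
  | nil => rfl
  | cons p rest ih =>
    obtain ⟨k, v⟩ := p
    rw [PySem.Dict.getD_eq_get?_getD, PySem.Dict.get?_mk_cons, List.find?_cons]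
    by_cases hk : k = (-1 : Int)
    · simp [hk]
    · have hkb : (k == (-1 : Int)) = false := by simpa using hk
      simp only [hkb, Bool.false_eq_true, if_false]
      rw [← PySem.Dict.getD_eq_get?_getD]
      exact ih

-- that token is nonempty iff D_'s `all` flag holds
theorem tok_ne_iff (inv_vocab : List (Int × String)) :
    ((PySem.Dict.mk inv_vocab).getD (-1) "[UNK]" ≠ "")
      ↔ (inv_vocab.find? (·.1 == -1)).all (·.2 != "") = true := by
  rw [getD_find]
  cases h : inv_vocab.find? (·.1 == -1) with
  | none => simp
  | some p => simp [Option.all_some, bne]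

-- A's result in terms of collA
theorem A_eq (frame_ids : List Int) (inv_vocab : List (Int × String)) (pad_id : Int) :
    decode_frames frame_ids inv_vocab pad_id
      = PySem.Str.join " " ((collA pad_id (-1) (frame_ids.filter (fun x => x ≠ -100))).map
          (fun i => (PySem.Dict.mk inv_vocab).getD i "[UNK]")) := by
  unfold decode_frames
  simp only [foldA_filter, foldA_eq_collA, List.nil_append]

-- B's result in terms of ded
theorem B_eq (frame_ids : List Int) (inv_vocab : List (Int × String)) (pad_id : Int) :
    decode_frames_alt frame_ids inv_vocab pad_id
      = PySem.Str.join " " (((ded none (frame_ids.filter (fun x => x ≠ -100))).filter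
          (fun i => i ≠ pad_id)).map (fun i => (PySem.Dict.mk inv_vocab).getD i "[UNK]")) := by
  unfold decode_frames_alt
  rw [outerB_eq, List.drop_zero, emitL_eq, List.nil_append]

-- inside the head condition, B's collapsed list is -1 followed by A's
theorem B_collapsed (pad : Int) (l : List Int) (hh : l.head? = some (-1)) (hp : pad ≠ -1) :
    (ded none l).filter (fun i => i ≠ pad) = -1 :: collA pad (-1) l := by
  cases l with
  | nil => simp at hh
  | cons x xs =>
    have hx : x = (-1 : Int) := by simpa using hh
    subst hx
    have hpn : ((-1 : Int) = pad) = False := by simp [Ne.symm hp]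
    simp [ded, collA, hpn, collA_eq_ded]

-- dropping leading -1s does not change A's collapse (last_id starts at -1)
theorem collA_dropWhile (pad : Int) (l : List Int) :
    collA pad (-1) l = collA pad (-1) (l.dropWhile (fun x => decide (x = -1))) := by
  induction l with
  | nil => rfl
  | cons x xs ih =>
    by_cases hx : x = (-1 : Int)
    · subst hx
      simpa [collA, List.dropWhile] using ih
    · simp [List.dropWhile, hx]

-- filtering -100 commutes with dropping the leading run of -100s and -1s
theorem filter_dropWhile_comm (l : List Int) :
    (l.filter (fun x => x ≠ -100)).dropWhile (fun x => decide (x = -1))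
      = (l.dropWhile (fun x => decide (x = -100) || decide (x = -1))).filter (fun x => x ≠ -100) := by
  induction l with
  | nil => rfl
  | cons x xs ih =>
    by_cases h0 : x = (-100 : Int)
    · simpa [List.filter_cons, List.dropWhile, h0] using ih
    · by_cases h1 : x = (-1 : Int)
      · simpa [List.dropWhile, h0, h1] using ih
      · simp [List.dropWhile, h0, h1]

-- from last = pad, A's collapse is empty iff everything is pad
theorem collA_pad_empty (pad : Int) (r : List Int) :
    collA pad pad r = [] ↔ ∀ x ∈ r, x = pad := by
  induction r with
  | nil => simp [collA]
  | cons x xs ih =>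
    by_cases hx : x = pad
    · simp [collA, hx, ih]
    · simp [collA, hx]

-- if the head is not the current last, A's collapse is empty iff everything is pad
theorem collA_empty_iff (pad last : Int) (r : List Int) (hlp : last ≠ pad)
    (hh : ∀ a, r.head? = some a → a ≠ last) :
    collA pad last r = [] ↔ ∀ x ∈ r, x = pad := by
  cases r with
  | nil => simp [collA]
  | cons x xs =>
    have hx : x ≠ last := hh x rfl
    by_cases hp : x = pad
    · subst hp
      simp [collA, hx, collA_pad_empty]
    · simp [collA, hx, hp]

-- the head surviving dropWhile fails the predicate
theorem dropWhile_head_false (p : Int → Bool) (l : List Int) (y : Int) (t : List Int)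
    (h : l.dropWhile p = y :: t) : p y = false := by
  induction l with
  | nil => simp at h
  | cons a as ih =>
    rw [List.dropWhile_cons] at h
    by_cases hp : p a
    · rw [if_pos hp] at h; exact ih h
    · rw [if_neg hp] at h
      cases h
      simpa using hp

-- A's collapsed list is empty iff D_'s `any` flag is false (under the head condition)
theorem collA_empty_iff_any (frame_ids : List Int) (pad_id : Int)
    (_hfind : frame_ids.find? (fun x => decide (x ≠ -100)) = some (-1)) (hp : pad_id ≠ -1) :
    collA pad_id (-1) (frame_ids.filter (fun x => x ≠ -100)) = []
      ↔ (frame_ids.dropWhile (fun x => decide (x = -100) || decide (x = -1))).any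
          (fun x => !(decide (x = -100) || decide (x = pad_id))) = false := by
  rw [collA_dropWhile, filter_dropWhile_comm]
  set w := frame_ids.dropWhile (fun x => decide (x = -100) || decide (x = -1)) with hwdef
  have hr : ∀ a, (w.filter (fun x => x ≠ -100)).head? = some a → a ≠ (-1 : Int) := by
    intro a ha
    cases hw : w with
    | nil => rw [hw] at ha; simp at ha
    | cons y t =>
      have hpy : (decide (y = -100) || decide (y = -1)) = false :=
        dropWhile_head_false _ frame_ids y t (by rw [← hwdef]; exact hw)
      have hy100 : y ≠ (-100 : Int) := by simpa using (Bool.or_eq_false_iff.mp hpy).1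
      have hy1 : y ≠ (-1 : Int) := by simpa using (Bool.or_eq_false_iff.mp hpy).2
      rw [hw, List.filter_cons, if_pos (by simpa using hy100)] at ha
      simp at ha
      exact ha ▸ hy1
  rw [collA_empty_iff pad_id (-1) _ (Ne.symm hp) hr]
  constructor
  · intro h
    rw [List.any_eq_false]
    intro x hx
    by_cases h0 : x = (-100 : Int)
    · simp [h0]
    · have : x = pad_id := h x (List.mem_filter.mpr ⟨hx, by simpa using h0⟩)
      simp [this]
  · intro h x hx
    obtain ⟨hxm, hx0⟩ := List.mem_filter.mp hx
    have hfl := List.any_eq_false.mp h x hxm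
    simp only [Bool.not_eq_true', Bool.not_eq_false, Bool.or_eq_true, decide_eq_true_eq] at hfl
    rcases hfl with h0 | hp'
    · exact absurd h0 (by simpa using hx0)
    · exact hp'

-- ===== VERDICT =====
theorem decode_frames_spec : Claim_unchanged_decode_frames := by
  intro frame_ids inv_vocab pad_id _ hD
  by_cases hb : frame_ids.find? (· != -100) = some (-1) ∧ pad_id ≠ -1
  · obtain ⟨hfind, hp⟩ := hb
    have hfind' : frame_ids.find? (fun x => decide (x ≠ -100)) = some (-1) := by
      rw [← bne_pred]; exact hfind
    have h3 : ¬ (((inv_vocab.find? (·.1 == -1)).all (·.2 != "") : Bool) = true ∨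
        ((frame_ids.dropWhile ([-100, -1].contains ·)).any
          (fun x => !([-100, pad_id].contains x)) : Bool) = true) :=
      fun hc => hD ⟨hfind, hp, hc⟩
    push Not at h3
    obtain ⟨htok, hany⟩ := h3
    have hany' : (frame_ids.dropWhile (fun x => decide (x = -100) || decide (x = -1))).any
        (fun x => !(decide (x = -100) || decide (x = pad_id))) = false := by
      rw [← dwp_pred, ← anyp_pred]
      simpa using hany
    have hhead : (frame_ids.filter (fun x => x ≠ -100)).head? = some (-1) := by
      rw [List.head?_filter]; exact hfind'
    have hc0 := (collA_empty_iff_any frame_ids pad_id hfind' hp).mpr hany'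
    rw [A_eq, B_eq, B_collapsed pad_id _ hhead hp, hc0]
    have htokv : (PySem.Dict.mk inv_vocab).getD (-1) "[UNK]" = "" := by
      by_contra hne
      exact htok ((tok_ne_iff inv_vocab).mp hne)
    refine String.toList_inj.mp ?_
    rw [PySem.Str.toList_join, PySem.Str.toList_join]
    simp [htokv, PySem.Chars.join_nil, PySem.Chars.join_singleton]
  · have hD' : ¬ ((frame_ids.filter (fun x => x ≠ -100)).head? = some (-1) ∧ pad_id ≠ -1) := by
      rw [List.head?_filter, ← bne_pred]; exact hb
    rw [A_eq, B_eq, main_eq pad_id _ hD']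

theorem decode_frames_changed : Claim_changed_decode_frames := by
  unfold Claim_changed_decode_frames
  refine ⟨by decide, by decide, by decide, ?_, by decide⟩
  rw [B_eq]; decide

theorem decode_frames_tight : Claim_exact_decode_frames := by
  intro frame_ids inv_vocab pad_id _ hd heq
  obtain ⟨hfind, hp, h3⟩ := hd
  have hfind' : frame_ids.find? (fun x => decide (x ≠ -100)) = some (-1) := by
    rw [← bne_pred]; exact hfind
  have hhead : (frame_ids.filter (fun x => x ≠ -100)).head? = some (-1) := by
    rw [List.head?_filter]; exact hfind'
  rw [A_eq, B_eq, B_collapsed pad_id _ hhead hp] at heq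
  have hlist := congrArg String.toList heq
  rw [PySem.Str.toList_join, PySem.Str.toList_join] at hlist
  cases hcc : collA pad_id (-1) (frame_ids.filter (fun x => x ≠ -100)) with
  | nil =>
    rw [hcc] at hlist
    rcases h3 with htok | hany2
    · have htl : ((PySem.Dict.mk inv_vocab).getD (-1) "[UNK]").toList = [] := by
        simpa [PySem.Chars.join_nil, PySem.Chars.join_singleton] using hlist.symm
      have hz : (PySem.Dict.mk inv_vocab).getD (-1) "[UNK]" = "" :=
        String.toList_inj.mp (by rw [htl]; rfl)
      exact ((tok_ne_iff inv_vocab).mpr htok) hz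
    · have hany0 := (collA_empty_iff_any frame_ids pad_id hfind' hp).mp hcc
      have h2 : (frame_ids.dropWhile (fun x => decide (x = -100) || decide (x = -1))).any
          (fun x => !(decide (x = -100) || decide (x = pad_id))) = true := by
        rw [← dwp_pred, ← anyp_pred]; exact hany2
      rw [h2] at hany0
      cases hany0
  | cons d ds =>
    rw [hcc] at hlist
    simp only [List.map_cons] at hlist
    rw [PySem.Chars.join_cons_cons] at hlist
    have hlen := congrArg List.length hlist
    have hsep : (" " : String).toList = [' '] := rfl
    rw [hsep] at hlen
    simp only [List.length_append, List.length_cons, List.length_nil] at hlen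
    omega
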